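-- pv_equiv track=rewrite | github.com/PerformanceEngineer/StrikingSpeed | punch_analysis.py | FindDominantAxis
-- ===== SOURCE A (Python) =====
-- def column(matrix, i):
--     return [row[i] for row in matrix]
--
-- def FindDominantAxis(a, time_data):
--     maxes=[max(column(a,0)), max(column(a,1)), max(column(a,2))]
--
--     dominant = maxes[0]
--     idx = 0
--     for i in range(0,3):
--         if (maxes[i]>dominant):
--             dominant = maxes[i]
--             idx = i
--
--     return idx
-- ===== SOURCE B (Python) =====
-- def FindDominantAxis(a, time_data):
--     it = iter(a)
--     try:
--         first = next(it)
--     except StopIteration: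
--         raise ValueError("empty matrix")
--     m0, m1, m2 = first[0], first[1], first[2]
--     for row in it:
--         if row[0] > m0:
--             m0 = row[0]
--         if row[1] > m1:
--             m1 = row[1]
--         if row[2] > m2:
--             m2 = row[2]
--     if m1 > m0:
--         return 2 if m2 > m1 else 1
--     return 2 if m2 > m0 else 0
-- ===== Notes on version B (the rewrite author's own statement) =====
-- stated objective: alternative
-- what changed: B makes one pass over the rows maintaining three running maxima and then picks the winning index with a short comparison chain, instead of materialising three column lists, calling max() on each and running an index loop over a maxes list; it trades A's C-level max() calls for a single explicit row loop.
import Mathlib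
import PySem

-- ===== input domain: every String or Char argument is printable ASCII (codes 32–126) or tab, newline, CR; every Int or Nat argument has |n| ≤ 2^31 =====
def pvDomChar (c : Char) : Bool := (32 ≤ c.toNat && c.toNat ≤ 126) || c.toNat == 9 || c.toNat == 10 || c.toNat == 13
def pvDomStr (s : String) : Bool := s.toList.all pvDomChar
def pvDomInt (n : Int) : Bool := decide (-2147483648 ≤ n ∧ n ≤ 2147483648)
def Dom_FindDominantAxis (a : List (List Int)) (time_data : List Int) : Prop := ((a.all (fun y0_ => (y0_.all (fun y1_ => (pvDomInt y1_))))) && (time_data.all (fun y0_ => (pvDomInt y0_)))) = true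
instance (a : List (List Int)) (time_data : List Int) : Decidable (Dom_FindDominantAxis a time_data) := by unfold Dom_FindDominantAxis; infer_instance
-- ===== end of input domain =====

-- B replaces A's three column-list builds + max() calls + index loop by one pass over the
-- rows keeping three running maxima, then a short comparison chain picks the index.


-- ===== PORT A =====
-- column(matrix, i) = [row[i] for row in matrix]; none = IndexError on a short row
def pvColumn (matrix : List (List Int)) (i : Int) : Option (List Int) :=
  matrix.mapM (fun row => PySem.List.pyGet? row i)

-- max(column(a, i)); none = IndexError or ValueError (empty column)
def pvColMax (a : List (List Int)) (i : Int) : Option Int :=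
  match pvColumn a i with
  | some col => PySem.List.max? col (fun y => y)
  | none => none

def FindDominantAxis (a : List (List Int)) (time_data : List Int) : Int :=
  match pvColMax a 0, pvColMax a 1, pvColMax a 2 with
  | some m0, some m1, some m2 =>
      -- dominant = maxes[0]; idx = 0; for i in range(0,3): if maxes[i] > dominant: …
      ((PySem.List.pyRange 0 3 1).foldl
        (fun (s : Int × Int) i =>
          match PySem.List.pyGet? [m0, m1, m2] i with
          | some v => if v > s.1 then (v, i) else s
          | none => s)  -- unreachable: i ∈ range(0,3)
        (m0, 0)).2
  | _, _, _ => 0  -- Python raises ValueError/IndexError here; excluded by Pre_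

-- ===== PORT B =====
-- one if-guarded update of a running maximum: 'if row[i] > m: m = row[i]'
-- (row[i] out of range = IndexError in Python; excluded by Pre_, the port keeps m)
def pvUpd (m : Int) (row : List Int) (i : Int) : Int :=
  let v := (PySem.List.pyGet? row i).getD m
  if v > m then v else m

def pvStep (s : Int × Int × Int) (row : List Int) : Int × Int × Int :=
  (pvUpd s.1 row 0, pvUpd s.2.1 row 1, pvUpd s.2.2 row 2)

-- first[0], first[1], first[2]; none = IndexError, excluded by Pre_
def pvGet3 (row : List Int) : Option (Int × Int × Int) :=
  (PySem.List.pyGet? row 0).bind fun x0 =>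
  (PySem.List.pyGet? row 1).bind fun x1 =>
  (PySem.List.pyGet? row 2).map fun x2 => (x0, x1, x2)

def FindDominantAxis_alt (a : List (List Int)) (time_data : List Int) : Int :=
  match a with
  | [] => 0  -- Python raises ValueError here; excluded by Pre_
  | first :: rest =>
    (pvGet3 first).elim 0 (fun t =>
      let s := rest.foldl pvStep t
      if s.2.1 > s.1 then (if s.2.2 > s.2.1 then 2 else 1)
      else (if s.2.2 > s.1 then 2 else 0))

-- ===== PRECONDITION & SPEC =====
-- A raises ValueError on an empty matrix (max of an empty column) and IndexError when some
-- row has fewer than 3 entries; B raises there too, so exactly those inputs are excluded.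
def Pre_FindDominantAxis (a : List (List Int)) (time_data : List Int) : Prop :=
  a ≠ [] ∧ ∀ row ∈ a, 3 ≤ row.length
instance (a : List (List Int)) (time_data : List Int) : Decidable (Pre_FindDominantAxis a time_data) := by unfold Pre_FindDominantAxis; infer_instance

def pvWitness_FindDominantAxis : List (List Int) × List Int := ([[1, 5, 2], [0, 3, 9]], [])

def Spec_FindDominantAxis (a : List (List Int)) (time_data : List Int) (out : Int) : Prop := out = FindDominantAxis_alt a time_data
instance (a : List (List Int)) (time_data : List Int) (out : Int) : Decidable (Spec_FindDominantAxis a time_data out) := by unfold Spec_FindDominantAxis; infer_instance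

-- ===== CLAIM (what is proved, stated in full; the proofs are below) =====
def Claim_equal_FindDominantAxis : Prop := ∀ (a : List (List Int)) (time_data : List Int), Dom_FindDominantAxis a time_data → Pre_FindDominantAxis a time_data → Spec_FindDominantAxis a time_data (FindDominantAxis a time_data)

-- ===== LEMMAS AND PROOFS =====

-- the per-column running-max loop body, as both ports compute it
theorem pvColumn_cons (r : List Int) (rest : List (List Int)) (i : Int) :
    pvColumn (r :: rest) i =
      (PySem.List.pyGet? r i).bind (fun x => (pvColumn rest i).map (fun col => x :: col)) := by
  simp [pvColumn, List.mapM_cons]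
  cases PySem.List.pyGet? r i <;> cases h : rest.mapM (fun row => PySem.List.pyGet? row i) <;>
    simp [Option.bind, h]

theorem pvColumn_of_len (rest : List (List Int)) (i : Int) (hi : 0 ≤ i)
    (h : ∀ row ∈ rest, i < (row.length : Int)) :
    pvColumn rest i = some (rest.map (fun row => row.getD i.toNat 0)) := by
  induction rest with
  | nil => simp [pvColumn]
  | cons r t ih =>
    have hr := h r (List.mem_cons_self ..)
    have hg : PySem.List.pyGet? r i = some (r.getD i.toNat 0) := by
      have : i.toNat < r.length := by omega
      simp [PySem.List.pyGet?, PySem.List.pyIdx?, hi, this, hr, List.getD, List.getElem?_eq_getElem]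
    rw [pvColumn_cons, hg, ih (fun row hm => h row (List.mem_cons_of_mem _ hm))]
    rfl

-- folding max over the extracted column equals B's guarded-update fold over the rows
theorem foldl_max_eq_upd (rest : List (List Int)) (i : Int) (hi : 0 ≤ i)
    (h : ∀ row ∈ rest, i < (row.length : Int)) (x : Int) :
    (rest.map (fun row => row.getD i.toNat 0)).foldl max x =
      rest.foldl (fun m row => pvUpd m row i) x := by
  induction rest generalizing x with
  | nil => rfl
  | cons r t ih =>
    have hr := h r (List.mem_cons_self ..)
    have hg : PySem.List.pyGet? r i = some (r.getD i.toNat 0) := by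
      have : i.toNat < r.length := by omega
      simp [PySem.List.pyGet?, PySem.List.pyIdx?, hi, this, hr, List.getD, List.getElem?_eq_getElem]
    simp only [List.map_cons, List.foldl_cons]
    rw [ih (fun row hm => h row (List.mem_cons_of_mem _ hm))]
    congr 1
    simp [pvUpd, hg, max_def]
    split_ifs <;> omega

-- under Pre_, A's max(column(…)) is B's running-max fold seeded by the first row
theorem pvColMax_eq (first : List Int) (rest : List (List Int)) (i : Int) (hi : 0 ≤ i)
    (h : ∀ row ∈ first :: rest, i < (row.length : Int)) :
    pvColMax (first :: rest) i =
      some (rest.foldl (fun m row => pvUpd m row i) (first.getD i.toNat 0)) := by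
  have h1 := h first (List.mem_cons_self ..)
  have hg : PySem.List.pyGet? first i = some (first.getD i.toNat 0) := by
    have : i.toNat < first.length := by omega
    simp [PySem.List.pyGet?, PySem.List.pyIdx?, hi, this, h1, List.getD, List.getElem?_eq_getElem]
  have hrest : ∀ row ∈ rest, i < (row.length : Int) :=
    fun row hm => h row (List.mem_cons_of_mem _ hm)
  rw [pvColMax, pvColumn_cons, hg, pvColumn_of_len rest i hi hrest]
  simp only [Option.bind, Option.map_some]
  rw [PySem.List.max?_id_cons, foldl_max_eq_upd rest i hi hrest]

-- B's simultaneous fold of the triple is the three per-column folds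
theorem foldl_step_split (rest : List (List Int)) (s : Int × Int × Int) :
    rest.foldl pvStep s =
      (rest.foldl (fun m row => pvUpd m row 0) s.1,
       rest.foldl (fun m row => pvUpd m row 1) s.2.1,
       rest.foldl (fun m row => pvUpd m row 2) s.2.2) := by
  induction rest generalizing s with
  | nil => rfl
  | cons r t ih => simp only [List.foldl_cons]; rw [ih]; rfl

-- ===== VERDICT (by name: the statement is the Claim_ definition above) =====
theorem FindDominantAxis_spec : Claim_equal_FindDominantAxis := by
  intro a time_data _ hpre
  obtain ⟨hne, hlen⟩ := hpre
  obtain ⟨first, rest, rfl⟩ := List.exists_cons_of_ne_nil hne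
  have hlen' : ∀ i : Int, i < 3 → ∀ row ∈ first :: rest, i < (row.length : Int) := by
    intro i hi row hm
    have := hlen row hm
    omega
  have h0 := pvColMax_eq first rest 0 (by omega) (hlen' 0 (by omega))
  have h1 := pvColMax_eq first rest 1 (by omega) (hlen' 1 (by omega))
  have h2 := pvColMax_eq first rest 2 (by omega) (hlen' 2 (by omega))
  have hg : ∀ i : Int, 0 ≤ i → i < (first.length : Int) →
      PySem.List.pyGet? first i = some (first.getD i.toNat 0) := by
    intro i hi hlt
    have : i.toNat < first.length := by omega
    simp [PySem.List.pyGet?, PySem.List.pyIdx?, hi, this, hlt, List.getD, List.getElem?_eq_getElem]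
  have hf := hlen first (List.mem_cons_self ..)
  have hg3 : pvGet3 first =
      some (first.getD (0 : Int).toNat 0, first.getD (1 : Int).toNat 0, first.getD (2 : Int).toNat 0) := by
    rw [pvGet3, hg 0 (by omega) (by omega), hg 1 (by omega) (by omega), hg 2 (by omega) (by omega)]
    rfl
  unfold Spec_FindDominantAxis FindDominantAxis FindDominantAxis_alt
  rw [h0, h1, h2]
  dsimp only
  rw [hg3]
  dsimp only [Option.elim]
  rw [foldl_step_split]
  dsimp only
  set m0 := rest.foldl (fun m row => pvUpd m row 0) (first.getD (0 : Int).toNat 0)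
  set m1 := rest.foldl (fun m row => pvUpd m row 1) (first.getD (1 : Int).toNat 0)
  set m2 := rest.foldl (fun m row => pvUpd m row 2) (first.getD (2 : Int).toNat 0)
  have hrange : PySem.List.pyRange 0 3 1 = [0, 1, 2] := by decide
  rw [hrange]
  simp only [List.foldl_cons, List.foldl_nil, PySem.List.pyGet?, PySem.List.pyIdx?]
  norm_num
  split_ifs <;> simp_all <;> omega
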